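-- pv_equiv track=rewrite | github.com/persolb/PointAndClickMaker | generate_character_image.py | remove_story_section
-- ===== SOURCE A (Python) =====
-- from typing import Any, Dict, List, Optional, Tuple
--
-- def remove_story_section(text: str, header: str) -> str:
--     lines = text.splitlines()
--     out: List[str] = []
--     skipping = False
--     for line in lines:
--         if not skipping and line.strip() == header:
--             skipping = True
--             continue
--         if skipping and line.startswith("## ") and line.strip() != header:
--             skipping = False
--         if not skipping:
--             out.append(line)
--     return "\n".join(out).strip()
-- ===== SOURCE B (Python) =====
-- def remove_story_section(text: str, header: str) -> str:
--     lines = text.splitlines()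
--     out = []
--     i, n = 0, len(lines)
--     while i < n:
--         line = lines[i]
--         if line.strip() == header:
--             # skip the section body: advance to the first following '## ' heading
--             # with a different title (or the end of the document)
--             i += 1
--             while i < n and not (lines[i].startswith("## ") and lines[i].strip() != header):
--                 i += 1
--         else:
--             out.append(line)
--             i += 1
--     return "\n".join(out).strip()
-- ===== Notes on version B (the rewrite author's own statement) =====
-- stated objective: alternative
-- what changed: Replaces A's per-line skipping-flag state machine with an outer loop that, on a header match, runs an explicit inner scan to the end of the section (a dropwhile), so no flag is carried across iterations.
import Mathlib
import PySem

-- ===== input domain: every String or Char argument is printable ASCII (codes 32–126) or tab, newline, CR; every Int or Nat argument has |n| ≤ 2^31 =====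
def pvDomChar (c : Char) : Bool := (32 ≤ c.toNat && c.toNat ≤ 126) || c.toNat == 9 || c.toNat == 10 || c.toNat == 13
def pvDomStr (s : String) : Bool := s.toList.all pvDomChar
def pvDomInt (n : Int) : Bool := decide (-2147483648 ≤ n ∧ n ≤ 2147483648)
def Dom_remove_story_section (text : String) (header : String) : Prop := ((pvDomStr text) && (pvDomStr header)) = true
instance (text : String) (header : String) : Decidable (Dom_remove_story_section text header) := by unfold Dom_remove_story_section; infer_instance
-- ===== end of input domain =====

-- B changes only the control structure (inner scan to section end vs a per-line flag); same output.

-- ===== PORT A =====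
-- one loop iteration of A: state = (skipping, out)
def pvAStep (header : List Char) (st : Bool × List (List Char)) (line : List Char) :
    Bool × List (List Char) :=
  if !st.1 && (PySem.Chars.strip line == header) then (true, st.2)
  else
    let sk := if st.1 && (PySem.Chars.startswith line ("## ".toList) && !(PySem.Chars.strip line == header)) then false else st.1
    if !sk then (sk, st.2 ++ [line]) else (sk, st.2)

def remove_story_section (text : String) (header : String) : String :=
  let lines := PySem.Chars.splitlines text.toList
  let r := lines.foldl (pvAStep header.toList) (false, [])
  String.ofList (PySem.Chars.strip (PySem.Chars.join ['\n'] r.2))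

-- ===== PORT B =====
-- the stop condition of B's inner while: a '## ' heading with a different title
def pvBStop (header : List Char) (line : List Char) : Bool :=
  PySem.Chars.startswith line ("## ".toList) && !(PySem.Chars.strip line == header)

-- B's outer while loop; the inner while is the dropWhile over the non-stop lines
def pvBLoop (header : List Char) : List (List Char) → List (List Char)
  | [] => []
  | l :: ls =>
    if PySem.Chars.strip l == header then
      pvBLoop header (ls.dropWhile (fun x => !(pvBStop header x)))
    else
      l :: pvBLoop header ls
termination_by ls => ls.length
decreasing_by
  · simpa using Nat.lt_succ_of_le (List.length_dropWhile_le _ _)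
  · simp

def remove_story_section_alt (text : String) (header : String) : String :=
  let lines := PySem.Chars.splitlines text.toList
  String.ofList (PySem.Chars.strip (PySem.Chars.join ['\n'] (pvBLoop header.toList lines)))

-- ===== PRECONDITION & SPEC =====
def Spec_remove_story_section (text : String) (header : String) (out : String) : Prop := out = remove_story_section_alt text header
instance (text : String) (header : String) (out : String) : Decidable (Spec_remove_story_section text header out) := by unfold Spec_remove_story_section; infer_instance

-- ===== CLAIM (what is proved, stated in full; the proofs are below) =====
def Claim_equal_remove_story_section : Prop := ∀ (text : String) (header : String), Dom_remove_story_section text header → Spec_remove_story_section text header (remove_story_section text header)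

-- ===== LEMMAS AND PROOFS =====

-- evaluation of one A-step in each of the four cases
theorem pvAStep_false_hdr (header l : List Char) (acc : List (List Char))
    (h : (PySem.Chars.strip l == header) = true) :
    pvAStep header (false, acc) l = (true, acc) := by
  simp [pvAStep, h]

theorem pvAStep_false_other (header l : List Char) (acc : List (List Char))
    (h : (PySem.Chars.strip l == header) = false) :
    pvAStep header (false, acc) l = (false, acc ++ [l]) := by
  simp [pvAStep, h]

theorem pvAStep_true_stop (header l : List Char) (acc : List (List Char))
    (h : pvBStop header l = true) :
    pvAStep header (true, acc) l = (false, acc ++ [l]) := by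
  simp only [pvAStep]
  rw [show (PySem.Chars.startswith l ("## ".toList) && !(PySem.Chars.strip l == header))
        = pvBStop header l from rfl, h]
  simp

theorem pvAStep_true_cont (header l : List Char) (acc : List (List Char))
    (h : pvBStop header l = false) :
    pvAStep header (true, acc) l = (true, acc) := by
  simp only [pvAStep]
  rw [show (PySem.Chars.startswith l ("## ".toList) && !(PySem.Chars.strip l == header))
        = pvBStop header l from rfl, h]
  simp

-- A's fold starting non-skipping produces pvBLoop; starting skipping produces pvBLoop after B's inner scan.
theorem pvFold_eq_bLoop (header : List Char) (ls : List (List Char)) :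
    (∀ acc, (ls.foldl (pvAStep header) (false, acc)).2 = acc ++ pvBLoop header ls)
    ∧ (∀ acc, (ls.foldl (pvAStep header) (true, acc)).2
        = acc ++ pvBLoop header (ls.dropWhile (fun x => !(pvBStop header x)))) := by
  induction ls with
  | nil => simp [pvBLoop]
  | cons l ls ih =>
    constructor
    · intro acc
      by_cases h : (PySem.Chars.strip l == header) = true
      · rw [List.foldl_cons, pvAStep_false_hdr header l acc h, pvBLoop, if_pos h]
        exact ih.2 acc
      · have h' : (PySem.Chars.strip l == header) = false := by simpa using h
        rw [List.foldl_cons, pvAStep_false_other header l acc h', pvBLoop, if_neg h]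
        rw [ih.1 (acc ++ [l]), List.append_assoc]
        rfl
    · intro acc
      by_cases h : pvBStop header l = true
      · have hne : ¬ (PySem.Chars.strip l == header) = true := by
          intro hc; simp [pvBStop, hc] at h
        rw [List.foldl_cons, pvAStep_true_stop header l acc h,
          List.dropWhile_cons_of_neg (by simp [h]), pvBLoop, if_neg hne]
        rw [ih.1 (acc ++ [l]), List.append_assoc]
        rfl
      · have h' : pvBStop header l = false := by simpa using h
        rw [List.foldl_cons, pvAStep_true_cont header l acc h',
          List.dropWhile_cons_of_pos (by simp [h'])]
        exact ih.2 acc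

-- ===== VERDICT (by name: the statement is the Claim_ definition above) =====
theorem remove_story_section_spec : Claim_equal_remove_story_section := by
  intro text header _
  show String.ofList (PySem.Chars.strip (PySem.Chars.join ['\n']
      ((List.foldl (pvAStep header.toList) (false, []) (PySem.Chars.splitlines text.toList)).2)))
    = remove_story_section_alt text header
  rw [(pvFold_eq_bLoop header.toList (PySem.Chars.splitlines text.toList)).1 []]
  rfl
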